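-- pv_equiv track=rewrite | github.com/olsenw/LeetCodeExercises | Python3/delete_columns_to_make_sorted_II.py | minDeletionSize_fails
-- ===== SOURCE A (Python) =====
-- from typing import List, Dict, Set, Optional
--
-- def minDeletionSize_fails(strs: List[str]) -> int:
--     m = len(strs)
--     n = len(strs[0])
--     stack = [[0] * n for _ in range(m+1)]
--     for j in range(n):
--         last = strs[0][j]
--         value = 0
--         for i in range(1,m):
--             if strs[i][j] < last:
--                 value = 2
--                 stack[i][j] = 2
--                 break
--             elif strs[i][j] == last:
--                 value = max(value, 1)
--                 stack[i][j] = 1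
--             last = strs[i][j]
--         stack[m][j] = value
--     answer = 0
--     for j in range(n):
--         if stack[m][j] == 0:
--             break
--         elif stack[m][j] == 2:
--             answer += 1
--     return answer
-- ===== SOURCE B (Python) =====
-- def minDeletionSize_fails(strs):
--     n = len(strs[0])
--     answer = 0
--     for j in range(n):
--         col = [s[j] for s in strs]
--         if sorted(col) != col:
--             answer += 1
--         elif len(set(col)) == len(col):
--             break
--     return answer
-- ===== Notes on version B (the rewrite author's own statement) =====
-- stated objective: simpler
-- what changed: B replaces A's manual early-break scan that fills an (m+1) x n stack matrix with a single loop that classifies each column by comparing it with its sorted copy (not non-decreasing) and with its set of distinct values (duplicate present), breaking at the first strictly increasing column.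
-- outside the precondition, e.g. on minDeletionSize_fails(['bc', 'ab', 'z']): A returns 2, B raises IndexError; on minDeletionSize_fails(['ab', 'b']): A raises IndexError, B returns 0
import Mathlib
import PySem

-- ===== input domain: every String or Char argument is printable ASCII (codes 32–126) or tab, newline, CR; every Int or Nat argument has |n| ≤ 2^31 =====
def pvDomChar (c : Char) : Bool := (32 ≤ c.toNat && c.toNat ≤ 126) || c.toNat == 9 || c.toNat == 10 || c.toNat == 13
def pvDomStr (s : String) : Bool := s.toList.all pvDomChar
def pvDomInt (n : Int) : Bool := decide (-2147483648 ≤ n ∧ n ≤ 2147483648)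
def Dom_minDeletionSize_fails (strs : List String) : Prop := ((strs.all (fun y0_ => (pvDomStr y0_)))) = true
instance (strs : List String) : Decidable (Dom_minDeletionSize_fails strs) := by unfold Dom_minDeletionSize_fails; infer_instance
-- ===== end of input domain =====

-- B classifies each column with sorted/set comparisons instead of A's manual scan into a
-- stack matrix; same return value on all non-empty rectangular inputs (objective: simpler).


-- ===== PORT A =====

-- stack[i][j] = v  (i, j are in range whenever Python's assignment is)
def pvSetAt (st : List (List Int)) (i j : Nat) (v : Int) : List (List Int) :=
  st.set i ((st.getD i []).set j v)

-- the inner 'for i in range(1, m)' loop of column j: state (last, value, stack); break = return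
def pvInnerA (strs : List String) (j m : Nat) :
    Nat → Nat → Char → Int → List (List Int) → Int × List (List Int)
  | 0, _, _, value, st => (value, st)            -- fuel m never runs out before i reaches m
  | fuel + 1, i, last, value, st =>
    if i < m then
      -- strs[i][j] (Python reads it in each comparison); in range under Pre_
      if PySem.List.pyGetD (PySem.List.pyGetD strs (i : Int) "").toList (j : Int) ' ' < last then
        (2, pvSetAt st i j 2)
      else if PySem.List.pyGetD (PySem.List.pyGetD strs (i : Int) "").toList (j : Int) ' ' = last then
        pvInnerA strs j m fuel (i + 1)
          (PySem.List.pyGetD (PySem.List.pyGetD strs (i : Int) "").toList (j : Int) ' ')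
          (max value 1) (pvSetAt st i j 1)
      else
        pvInnerA strs j m fuel (i + 1)
          (PySem.List.pyGetD (PySem.List.pyGetD strs (i : Int) "").toList (j : Int) ' ')
          value st
    else
      (value, st)

-- the outer 'for j in range(n)' loop building the stack
def pvOuterA (strs : List String) (m n : Nat) :
    Nat → Nat → List (List Int) → List (List Int)
  | 0, _, st => st                               -- fuel n never runs out before j reaches n
  | fuel + 1, j, st =>
    if j < n then
      let last := PySem.List.pyGetD (PySem.List.pyGetD strs (0 : Int) "").toList (j : Int) ' '
      let r := pvInnerA strs j m m 1 last 0 st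
      pvOuterA strs m n fuel (j + 1) (pvSetAt r.2 m j r.1)
    else
      st

-- the answer loop: 'for j in range(n): if stack[m][j] == 0: break elif == 2: answer += 1'
def pvAnsA (st : List (List Int)) (m n : Nat) : Nat → Nat → Int → Int
  | 0, _, answer => answer                       -- fuel n never runs out before j reaches n
  | fuel + 1, j, answer =>
    if j < n then
      -- Python indexes stack[m][j] in each comparison
      if PySem.List.pyGetD (PySem.List.pyGetD st (m : Int) []) (j : Int) 0 = 0 then answer
      else if PySem.List.pyGetD (PySem.List.pyGetD st (m : Int) []) (j : Int) 0 = 2 then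
        pvAnsA st m n fuel (j + 1) (answer + 1)
      else pvAnsA st m n fuel (j + 1) answer
    else
      answer

def minDeletionSize_fails (strs : List String) : Int :=
  let m := strs.length
  let n := (PySem.List.pyGetD strs (0 : Int) "").toList.length   -- len(strs[0]); strs ≠ [] in Pre_
  let stack := List.replicate (m + 1) (List.replicate n (0 : Int))
  let stack' := pvOuterA strs m n n 0 stack
  pvAnsA stack' m n n 0 0

-- ===== PORT B =====

-- 'for j in range(n)' with break; answer accumulated
def pvLoopB (strs : List String) (n : Nat) : Nat → Nat → Int → Int
  | 0, _, answer => answer                       -- fuel n never runs out before j reaches n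
  | fuel + 1, j, answer =>
    if j < n then
      let col := strs.map (fun s => PySem.List.pyGetD s.toList (j : Int) ' ')   -- [s[j] for s in strs]
      if PySem.List.sorted col (fun c => c) ≠ col then
        pvLoopB strs n fuel (j + 1) (answer + 1)
      else if (PySem.Set.ofList col).length = col.length then
        answer
      else
        pvLoopB strs n fuel (j + 1) answer
    else
      answer

def minDeletionSize_fails_alt (strs : List String) : Int :=
  let n := (PySem.List.pyGetD strs (0 : Int) "").toList.length   -- len(strs[0]); strs ≠ [] in Pre_
  pvLoopB strs n n 0 0

-- ===== PRECONDITION & SPEC =====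
-- Pre_ excludes the empty list (Python raises IndexError at strs[0]) and lists where some
-- later string is shorter than the first: there an IndexError depends on where A's
-- early break (resp. B's column break) happens to fall, so whether either program returns
-- at all is an accident of its scan order.
def Pre_minDeletionSize_fails (strs : List String) : Prop :=
  strs ≠ [] ∧ ∀ s ∈ strs, PySem.Str.len (strs.headD "") ≤ PySem.Str.len s
instance (strs : List String) : Decidable (Pre_minDeletionSize_fails strs) := by
  unfold Pre_minDeletionSize_fails; infer_instance

def pvWitness_minDeletionSize_fails : List String := ["ba", "ab"]

def Spec_minDeletionSize_fails (strs : List String) (out : Int) : Prop := out = minDeletionSize_fails_alt strs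
instance (strs : List String) (out : Int) : Decidable (Spec_minDeletionSize_fails strs out) := by unfold Spec_minDeletionSize_fails; infer_instance

-- ===== CLAIM (what is proved, stated in full; the proofs are below) =====
def Claim_equal_minDeletionSize_fails : Prop := ∀ (strs : List String), Dom_minDeletionSize_fails strs → Pre_minDeletionSize_fails strs → Spec_minDeletionSize_fails strs (minDeletionSize_fails strs)

-- ===== LEMMAS AND PROOFS =====

-- the character in row s, column j (both ports read it the same way)
def pvF (j : Nat) (s : String) : Char := s.toList.getD j ' '

-- some adjacent strict decrease in last :: cs
def pvHasDec : Char → List Char → Bool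
  | _, [] => false
  | a, b :: t => decide (b < a) || pvHasDec b t

-- some adjacent equal pair in last :: cs
def pvHasEq : Char → List Char → Bool
  | _, [] => false
  | a, b :: t => decide (b = a) || pvHasEq b t

-- A's column value, as a pure scan (no stack)
def pvScan : Char → List Char → Int → Int
  | _, [], v => v
  | last, c :: cs, v =>
    if c < last then 2
    else if c = last then pvScan c cs (max v 1)
    else pvScan c cs v

-- the classification of a column: 2 / 1 / 0
def pvClassify : List Char → Int
  | [] => 0
  | a :: t => if pvHasDec a t then 2 else if pvHasEq a t then 1 else 0

-- the common aggregation loop: break at the first 0, count the 2s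
def pvCnt (g : Nat → Int) (n : Nat) : Nat → Nat → Int → Int
  | 0, _, acc => acc
  | fuel + 1, j, acc =>
    if j < n then
      if g j = 0 then acc
      else if g j = 2 then pvCnt g n fuel (j + 1) (acc + 1)
      else pvCnt g n fuel (j + 1) acc
    else
      acc

theorem pvScan_spec (cs : List Char) : ∀ (last : Char) (v : Int),
    pvScan last cs v =
      if pvHasDec last cs then 2 else if pvHasEq last cs then max v 1 else v := by
  induction cs with
  | nil => intro last v; simp [pvScan, pvHasDec, pvHasEq]
  | cons c cs ih =>
    intro last v
    by_cases h1 : c < last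
    · simp [pvScan, pvHasDec, h1]
    · by_cases h2 : c = last
      · subst h2
        rw [pvScan]
        simp only [if_neg h1, ih]
        by_cases hd : pvHasDec c cs = true
        · simp [pvHasDec, hd]
        · simp only [Bool.not_eq_true] at hd
          by_cases he : pvHasEq c cs = true
          · simp [pvHasDec, pvHasEq, hd, he]
          · simp only [Bool.not_eq_true] at he
            simp [pvHasDec, pvHasEq, hd, he]
      · rw [pvScan]
        simp only [if_neg h1, if_neg h2, ih]
        by_cases hd : pvHasDec c cs = true
        · simp [pvHasDec, hd, h1]
        · simp only [Bool.not_eq_true] at hd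
          by_cases he : pvHasEq c cs = true
          · simp [pvHasDec, pvHasEq, hd, he, h1, h2]
          · simp only [Bool.not_eq_true] at he
            simp [pvHasDec, pvHasEq, hd, he, h1, h2]

theorem pvHasDec_false_iff (t : List Char) : ∀ a : Char,
    pvHasDec a t = false ↔ List.Pairwise (· ≤ ·) (a :: t) := by
  induction t with
  | nil => intro a; simp [pvHasDec]
  | cons b t ih =>
    intro a
    constructor
    · intro h
      simp only [pvHasDec, Bool.or_eq_false_iff, decide_eq_false_iff_not, not_lt] at h
      have hp := (ih b).mp h.2
      have hb := (List.pairwise_cons.mp hp).1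
      refine List.pairwise_cons.mpr ⟨fun x hx => ?_, hp⟩
      rcases List.mem_cons.mp hx with rfl | hx
      · exact h.1
      · exact le_trans h.1 (hb x hx)
    · intro h
      rw [List.pairwise_cons] at h
      simp only [pvHasDec, Bool.or_eq_false_iff, decide_eq_false_iff_not, not_lt]
      exact ⟨h.1 b (by simp), (ih b).mpr h.2⟩

theorem pvLt_of_false_false (t : List Char) : ∀ a : Char,
    pvHasDec a t = false → pvHasEq a t = false → List.Pairwise (· < ·) (a :: t) := by
  induction t with
  | nil => intro a _ _; simp
  | cons b t ih =>
    intro a hd he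
    simp only [pvHasDec, Bool.or_eq_false_iff, decide_eq_false_iff_not, not_lt] at hd
    simp only [pvHasEq, Bool.or_eq_false_iff, decide_eq_false_iff_not] at he
    have hab : a < b := lt_of_le_of_ne hd.1 (fun h => he.1 h.symm)
    have hp := ih b hd.2 he.2
    have hb := (List.pairwise_cons.mp hp).1
    refine List.pairwise_cons.mpr ⟨fun x hx => ?_, hp⟩
    rcases List.mem_cons.mp hx with rfl | hx
    · exact hab
    · exact lt_trans hab (hb x hx)

theorem pvHasEq_false_of_nodup (t : List Char) : ∀ a : Char,
    (a :: t).Nodup → pvHasEq a t = false := by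
  induction t with
  | nil => intro a _; simp [pvHasEq]
  | cons b t ih =>
    intro a hnd
    simp only [pvHasEq, Bool.or_eq_false_iff, decide_eq_false_iff_not]
    rcases List.nodup_cons.mp hnd with ⟨ha, hnd'⟩
    exact ⟨fun h => ha (h ▸ (by simp : a ∈ a :: t)), ih b hnd'⟩

theorem pvOfList_len_iff (xs : List Char) :
    (PySem.Set.ofList xs).length = xs.length ↔ xs.Nodup := by
  induction xs with
  | nil => simp [PySem.Set.ofList, PySem.Set.empty]
  | cons x xs ih =>
    rw [PySem.Set.ofList_cons]
    constructor
    · intro h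
      simp only [List.length_cons] at h
      have hle1 : ((PySem.Set.ofList xs).discard x).length ≤ (PySem.Set.ofList xs).length := by
        simp only [PySem.Set.discard]
        exact List.length_filter_le _ _
      have hle2 := PySem.Set.length_ofList_le xs
      have heq1 : ((PySem.Set.ofList xs).discard x).length = (PySem.Set.ofList xs).length := by
        omega
      have heq2 : (PySem.Set.ofList xs).length = xs.length := by omega
      have hxs : xs.Nodup := ih.mp heq2
      have hx : x ∉ xs := by
        intro hx
        have hmem : x ∈ PySem.Set.ofList xs := (PySem.Set.mem_ofList xs x).mpr hx
        have : ((PySem.Set.ofList xs).filter (fun y => !y == x)).length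
            < (PySem.Set.ofList xs).length := by
          apply List.length_filter_lt_length_iff_exists.mpr
          exact ⟨x, hmem, by simp⟩
        simp only [PySem.Set.discard] at heq1
        omega
      exact List.nodup_cons.mpr ⟨hx, hxs⟩
    · intro h
      rcases List.nodup_cons.mp h with ⟨hx, hxs⟩
      have h1 : PySem.Set.ofList xs = xs := PySem.Set.ofList_eq_self_of_nodup xs hxs
      have h2 : (PySem.Set.ofList xs).discard x = xs := by
        rw [h1]
        simp only [PySem.Set.discard]
        apply List.filter_eq_self.mpr
        intro y hy
        simp only [Bool.not_eq_eq_eq_not, Bool.not_true, beq_eq_false_iff_ne]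
        exact fun h => hx (h ▸ hy)
      simp [h2]

-- A's inner loop returns the pure scan of the remaining column
theorem pvInnerA_fst (strs : List String) (j : Nat) : ∀ (fuel i : Nat) (last : Char) (v : Int)
    (st : List (List Int)), strs.length - i ≤ fuel →
    (pvInnerA strs j strs.length fuel i last v st).1 =
      pvScan last ((strs.drop i).map (pvF j)) v := by
  intro fuel
  induction fuel with
  | zero =>
    intro i last v st hk
    have hnil : strs.drop i = [] := List.drop_eq_nil_of_le (by omega)
    simp [pvInnerA, hnil, pvScan]
  | succ fuel ih =>
    intro i last v st hk
    by_cases h : i < strs.length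
    · have hdrop : strs.drop i = strs[i] :: strs.drop (i + 1) :=
        List.drop_eq_getElem_cons h
      have hc : PySem.List.pyGetD (PySem.List.pyGetD strs (i : Int) "").toList (j : Int) ' '
          = pvF j strs[i] := by
        simp [PySem.List.pyGetD_natCast, pvF, List.getD_eq_getElem?_getD,
          List.getElem?_eq_getElem h]
      rw [pvInnerA]
      simp only [h, if_pos, hc, hdrop, List.map_cons, pvScan]
      split_ifs with h1 h2
      · rfl
      · exact ih (i + 1) _ _ _ (by omega)
      · exact ih (i + 1) _ _ _ (by omega)
    · have hnil : strs.drop i = [] := List.drop_eq_nil_of_le (by omega)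
      rw [pvInnerA]
      simp [h, hnil, pvScan]

-- A's inner loop never touches row m (it writes rows i < m) nor the stack's length
theorem pvInnerA_snd (strs : List String) (j m : Nat) : ∀ (fuel i : Nat) (last : Char) (v : Int)
    (st : List (List Int)),
    ((pvInnerA strs j m fuel i last v st).2.getD m [] = st.getD m [] ∧
      (pvInnerA strs j m fuel i last v st).2.length = st.length) := by
  intro fuel
  induction fuel with
  | zero =>
    intro i last v st
    simp [pvInnerA]
  | succ fuel ih =>
    intro i last v st
    by_cases h : i < m
    · have hrow : ∀ (v' : Int), (pvSetAt st i j v').getD m [] = st.getD m [] := by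
        intro v'
        simp only [pvSetAt, List.getD_eq_getElem?_getD]
        rw [List.getElem?_set_ne (by omega)]
      have hlen : ∀ (v' : Int), (pvSetAt st i j v').length = st.length := by
        intro v'; simp [pvSetAt]
      rw [pvInnerA]
      simp only [h, if_pos]
      split_ifs with h1 h2
      · exact ⟨hrow 2, hlen 2⟩
      · have := ih (i + 1) (PySem.List.pyGetD (PySem.List.pyGetD strs (i : Int) "").toList (j : Int) ' ')
          (max v 1) (pvSetAt st i j 1)
        rw [this.1, this.2, hrow, hlen]
        exact ⟨rfl, rfl⟩
      · exact ih (i + 1) (PySem.List.pyGetD (PySem.List.pyGetD strs (i : Int) "").toList (j : Int) ' ')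
          v st
    · rw [pvInnerA]
      simp [h]

-- A's column value as a pure function of the input
def pvGval (strs : List String) (j : Nat) : Int :=
  pvClassify (strs.map (pvF j))

theorem pvGval_eq_scan (strs : List String) (j : Nat) :
    pvScan (pvF j (strs.getD 0 "")) ((strs.drop 1).map (pvF j)) 0 = pvGval strs j := by
  cases strs with
  | nil => simp [pvScan, pvGval, pvClassify]
  | cons s0 rest =>
    simp only [List.getD_cons_zero, List.drop_succ_cons, List.drop_zero, pvGval,
      List.map_cons, pvClassify]
    rw [pvScan_spec]
    by_cases hd : pvHasDec (pvF j s0) (rest.map (pvF j)) = true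
    · simp [hd]
    · simp only [Bool.not_eq_true] at hd
      by_cases he : pvHasEq (pvF j s0) (rest.map (pvF j)) = true
      · simp [hd, he]
      · simp only [Bool.not_eq_true] at he
        simp [hd, he]

-- the outer loop fills row m with the column values
theorem pvOuterA_row (strs : List String) (n : Nat) : ∀ (fuel j0 : Nat) (st : List (List Int)),
    n - j0 ≤ fuel → st.length = strs.length + 1 → (st.getD strs.length []).length = n →
    ∀ c, c < n →
      ((pvOuterA strs strs.length n fuel j0 st).getD strs.length []).getD c 0 =
        if j0 ≤ c then pvGval strs c else (st.getD strs.length []).getD c 0 := by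
  intro fuel
  induction fuel with
  | zero =>
    intro j0 st hk _ _ c hc
    rw [pvOuterA, if_neg (by omega : ¬ j0 ≤ c)]
  | succ fuel ih =>
    intro j0 st hk hlen hrow c hc
    by_cases h : j0 < n
    · rw [pvOuterA]
      simp only [h, if_pos]
      set last := PySem.List.pyGetD (PySem.List.pyGetD strs ((0:Nat) : Int) "").toList ((j0 : Nat) : Int) ' ' with hlast
      set r := pvInnerA strs j0 strs.length strs.length 1 last 0 st with hr
      show ((pvOuterA strs strs.length n fuel (j0 + 1) (pvSetAt r.2 strs.length j0 r.1)).getD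
        strs.length []).getD c 0 = _
      have hsnd := pvInnerA_snd strs j0 strs.length strs.length 1 last 0 st
      rw [← hr] at hsnd
      have hfst : r.1 = pvGval strs j0 := by
        rw [hr, pvInnerA_fst strs j0 strs.length 1 last 0 st (by omega), hlast]
        have hl : PySem.List.pyGetD (PySem.List.pyGetD strs ((0:Nat) : Int) "").toList ((j0 : Nat) : Int) ' '
            = pvF j0 (strs.getD 0 "") := by
          simp [PySem.List.pyGetD_natCast, PySem.List.pyGetD_zero, pvF]
        rw [hl, pvGval_eq_scan]
      have hl2 : r.2.length = st.length := hsnd.2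
      have hm_lt : strs.length < r.2.length := by omega
      have hnewrow : (pvSetAt r.2 strs.length j0 r.1).getD strs.length []
          = (st.getD strs.length []).set j0 r.1 := by
        unfold pvSetAt
        rw [List.getD_eq_getElem?_getD, List.getElem?_set_self hm_lt, Option.getD_some, hsnd.1]
      have hnewlen : (pvSetAt r.2 strs.length j0 r.1).length = strs.length + 1 := by
        simp [pvSetAt, hl2, hlen]
      have hnewrowlen : ((pvSetAt r.2 strs.length j0 r.1).getD strs.length []).length = n := by
        rw [hnewrow, List.length_set, hrow]
      rw [ih (j0 + 1) _ (by omega) hnewlen hnewrowlen c hc]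
      by_cases hj1 : j0 + 1 ≤ c
      · rw [if_pos hj1, if_pos (by omega : j0 ≤ c)]
      · rw [if_neg hj1, hnewrow]
        by_cases hceq : c = j0
        · subst hceq
          rw [List.getD_eq_getElem?_getD,
            List.getElem?_set_self (by omega : c < (st.getD strs.length []).length),
            Option.getD_some, hfst, if_pos (le_refl c)]
        · rw [List.getD_eq_getElem?_getD, List.getElem?_set_ne (by omega),
            ← List.getD_eq_getElem?_getD, if_neg (by omega : ¬ j0 ≤ c)]
    · rw [pvOuterA]
      simp only [h, if_false]
      rw [if_neg (by omega : ¬ j0 ≤ c)]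

-- the answer loop is the generic count, given row m carries g
theorem pvAnsA_eq_cnt (st : List (List Int)) (m n : Nat) (g : Nat → Int)
    (hg : ∀ c, c < n → (PySem.List.pyGetD (PySem.List.pyGetD st (m : Int) []) (c : Int) 0) = g c) :
    ∀ (fuel j : Nat) (acc : Int), pvAnsA st m n fuel j acc = pvCnt g n fuel j acc := by
  intro fuel
  induction fuel with
  | zero =>
    intro j acc
    rw [pvAnsA, pvCnt]
  | succ fuel ih =>
    intro j acc
    rw [pvAnsA, pvCnt]
    by_cases h : j < n
    · rw [if_pos h, if_pos h, hg j h]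
      by_cases h0 : g j = 0
      · rw [if_pos h0, if_pos h0]
      · rw [if_neg h0, if_neg h0]
        by_cases h2 : g j = 2
        · rw [if_pos h2, if_pos h2]
          exact ih (j + 1) (acc + 1)
        · rw [if_neg h2, if_neg h2]
          exact ih (j + 1) acc
    · rw [if_neg h, if_neg h]

-- B's loop is the same generic count
theorem pvLoopB_eq_cnt (strs : List String) (n : Nat) :
    ∀ (fuel j : Nat) (acc : Int),
      pvLoopB strs n fuel j acc = pvCnt (pvGval strs) n fuel j acc := by
  intro fuel
  induction fuel with
  | zero =>
    intro j acc
    rw [pvLoopB, pvCnt]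
  | succ fuel ih =>
    intro j acc
    rw [pvLoopB, pvCnt]
    by_cases h : j < n
    · simp only [h, if_pos]
      have hcol : strs.map (fun s => PySem.List.pyGetD s.toList (j : Int) ' ')
          = strs.map (pvF j) := by
        apply List.map_congr_left
        intro s _
        simp [PySem.List.pyGetD_natCast, pvF]
      rw [hcol]
      -- case on the shape of the column
      cases hc : strs.map (pvF j) with
      | nil =>
        have hg : pvGval strs j = 0 := by simp [pvGval, hc, pvClassify]
        simp [hg, PySem.List.sorted, PySem.Set.ofList, PySem.Set.empty]
      | cons a t =>
        by_cases hd : pvHasDec a t = true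
        · -- column not sorted: A's value is 2, B increments
          have hg : pvGval strs j = 2 := by simp [pvGval, hc, pvClassify, hd]
          have hns : PySem.List.sorted (a :: t) (fun c => c) ≠ a :: t := by
            intro hs
            have hp := PySem.List.sorted_pairwise (a :: t) (fun c => c)
            rw [hs] at hp
            have := (pvHasDec_false_iff t a).mpr hp
            rw [hd] at this; cases this
          simp only [hns, if_pos, ne_eq, not_false_iff, hg]
          rw [ih (j + 1) (acc + 1)]
          simp
        · simp only [Bool.not_eq_true] at hd
          have hs : PySem.List.sorted (a :: t) (fun c => c) = a :: t :=
            PySem.List.sorted_eq_self_of_pairwise _ _ ((pvHasDec_false_iff t a).mp hd)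
          by_cases he : pvHasEq a t = true
          · -- sorted with a duplicate: A's value is 1, both continue
            have hg : pvGval strs j = 1 := by simp [pvGval, hc, pvClassify, hd, he]
            have hnd : ¬ (a :: t).Nodup := by
              intro hnd
              have := pvHasEq_false_of_nodup t a hnd
              rw [he] at this; cases this
            have hlen : ¬ (PySem.Set.ofList (a :: t)).length = (a :: t).length := by
              intro hl; exact hnd ((pvOfList_len_iff (a :: t)).mp hl)
            simp only [hs, ne_eq, not_true_eq_false, hlen, if_neg,
              not_false_iff, hg]
            rw [ih (j + 1) acc]
            simp
          · -- strictly increasing column: A's value is 0, both stop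
            simp only [Bool.not_eq_true] at he
            have hg : pvGval strs j = 0 := by simp [pvGval, hc, pvClassify, hd, he]
            have hnd : (a :: t).Nodup :=
              (pvLt_of_false_false t a hd he).imp (fun hab => ne_of_lt hab)
            have hlen : (PySem.Set.ofList (a :: t)).length = (a :: t).length :=
              (pvOfList_len_iff (a :: t)).mpr hnd
            simp [hs, hlen, hg]
    · simp [h]

-- ===== VERDICT (by name: the statement is the Claim_ definition above) =====
theorem minDeletionSize_fails_spec : Claim_equal_minDeletionSize_fails := by
  intro strs _ _
  unfold Spec_minDeletionSize_fails minDeletionSize_fails minDeletionSize_fails_alt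
  set m := strs.length with hm
  set n := (PySem.List.pyGetD strs (0 : Int) "").toList.length with hn
  set stack := List.replicate (m + 1) (List.replicate n (0 : Int)) with hstack
  have hlen : stack.length = m + 1 := by simp [hstack]
  have hrow0 : stack.getD m [] = List.replicate n (0 : Int) := by
    simp [hstack, List.getD_eq_getElem?_getD]
  have hrowlen : (stack.getD m []).length = n := by rw [hrow0]; simp
  have hfill := pvOuterA_row strs n n 0 stack (by omega) hlen hrowlen
  have hg : ∀ c, c < n →
      (PySem.List.pyGetD (PySem.List.pyGetD (pvOuterA strs m n n 0 stack) (m : Int) [])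
        (c : Int) 0) = pvGval strs c := by
    intro c hc
    have := hfill c hc
    simp only [Nat.zero_le, if_pos] at this
    simp only [PySem.List.pyGetD_natCast]
    exact this
  rw [pvAnsA_eq_cnt (pvOuterA strs m n n 0 stack) m n (pvGval strs) hg n 0 0]
  rw [pvLoopB_eq_cnt strs n n 0 0]
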